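-- pv_equiv track=rewrite | github.com/diegogerwig/advent_of_code | 2024/22/advent_2024_22.py | evaluate_sequence_batch
-- ===== SOURCE A (Python) =====
-- def get_price_changes(prices):
--     """Calculate the changes between consecutive prices"""
--     # More efficient list comprehension for changes
--     return [b - a for a, b in zip(prices[:-1], prices[1:])]
--
-- def find_first_match(changes, target_sequence):
--     """Find the first occurrence of target_sequence in changes using a sliding window"""
--     target_len = len(target_sequence)
--     for i in range(len(changes) - target_len + 1):
--         # Use direct comparison for better performance
--         match = True
--         for j in range(target_len):
--             if changes[i + j] != target_sequence[j]:
--                 match = False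
--                 break
--         if match:
--             return i + target_len
--     return -1
--
-- def evaluate_sequence_batch(args):
--     """Evaluate a batch of sequences against all price sequences"""
--     sequences_batch, price_sequences = args
--     results = []
--
--     for sequence in sequences_batch:
--         total_bananas = 0
--         for prices in price_sequences:
--             changes = get_price_changes(prices)
--             match_index = find_first_match(changes, sequence)
--             if match_index != -1:
--                 total_bananas += prices[match_index]
--         results.append((sequence, total_bananas))
--
--     return results
-- ===== SOURCE B (Python) =====
-- def evaluate_sequence_batch(args):
--     """Evaluate a batch of sequences against all price sequences.
--
--     Instead of re-scanning every price sequence for every candidate sequence,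
--     precompute (once per distinct sequence length) a first-occurrence table
--     change-window -> price for each price sequence; each candidate then costs
--     one dict lookup per price sequence."""
--     sequences_batch, price_sequences = args
--     cache = {}  # length -> list of first-occurrence tables, one per price sequence
--     results = []
--     for seq in sequences_batch:
--         length = len(seq)
--         if length not in cache:
--             tables = []
--             for prices in price_sequences:
--                 changes = [b - a for a, b in zip(prices, prices[1:])]
--                 table = {}
--                 for i in range(len(changes) - length + 1):
--                     table.setdefault(tuple(changes[i:i + length]), prices[i + length])
--                 tables.append(table)
--             cache[length] = tables
--         key = tuple(seq)
--         results.append((seq, sum(t.get(key, 0) for t in cache[length])))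
--     return results
-- ===== Notes on version B (the rewrite author's own statement) =====
-- stated objective: faster
-- what changed: B precomputes, once per distinct sequence length, a first-occurrence dict (change-window -> price) for every price sequence, so each candidate sequence costs one dict lookup per price sequence instead of a fresh sliding-window rescan of every price sequence.
import Mathlib
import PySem

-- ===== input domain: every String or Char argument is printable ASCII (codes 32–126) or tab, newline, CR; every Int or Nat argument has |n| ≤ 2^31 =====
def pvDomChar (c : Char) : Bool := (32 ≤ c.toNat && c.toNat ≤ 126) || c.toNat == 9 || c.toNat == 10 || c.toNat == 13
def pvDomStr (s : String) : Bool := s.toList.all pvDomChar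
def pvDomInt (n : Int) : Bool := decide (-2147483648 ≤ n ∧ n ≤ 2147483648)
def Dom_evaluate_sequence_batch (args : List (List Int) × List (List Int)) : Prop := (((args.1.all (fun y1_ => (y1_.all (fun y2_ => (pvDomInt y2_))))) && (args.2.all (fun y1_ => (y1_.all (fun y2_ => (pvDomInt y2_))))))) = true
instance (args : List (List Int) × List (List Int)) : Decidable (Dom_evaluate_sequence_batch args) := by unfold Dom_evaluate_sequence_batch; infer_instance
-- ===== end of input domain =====

-- B replaces A's per-(sequence, price-list) sliding-window rescans by per-length precomputed
-- first-occurrence dicts (change-window -> price), one per price sequence: the timed objective is speed.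

-- ===== PORT A =====
def get_price_changes (prices : List Int) : List Int :=
  (List.zip (PySem.List.slice prices none (some (-1))) (PySem.List.slice prices (some 1) none)).map
    (fun ab => ab.2 - ab.1)

-- inner 'for j in range(target_len)' loop with its break: false as soon as one position differs
def find_first_match_inner (changes target : List Int) (i : Int) : List Int → Bool
  | [] => true
  | j :: js =>
    if PySem.List.pyGetD changes (i + j) 0 ≠ PySem.List.pyGetD target j 0 then false
    else find_first_match_inner changes target i js

-- outer 'for i in range(len(changes) - target_len + 1)' loop with its early return
def find_first_match_loop (changes target : List Int) (tl : Int) : List Int → Int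
  | [] => -1
  | i :: is_ =>
    if find_first_match_inner changes target i (PySem.List.pyRange 0 tl 1) then i + tl
    else find_first_match_loop changes target tl is_

def find_first_match (changes target : List Int) : Int :=
  find_first_match_loop changes target (target.length : Int)
    (PySem.List.pyRange 0 ((changes.length : Int) - (target.length : Int) + 1) 1)

def evaluate_sequence_batch (args : List (List Int) × List (List Int)) : List (List Int × Int) :=
  args.1.foldl
    (fun results seq =>
      let total_bananas := args.2.foldl
        (fun tot prices =>
          let changes := get_price_changes prices
          let match_index := find_first_match changes seq
          -- prices[match_index]: in range whenever Python does not raise (see Pre_)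
          if match_index ≠ -1 then tot + PySem.List.pyGetD prices match_index 0 else tot)
        0
      results ++ [(seq, total_bananas)])
    []

-- ===== PORT B =====
def altChanges (prices : List Int) : List Int :=
  (List.zip prices (PySem.List.slice prices (some 1) none)).map (fun ab => ab.2 - ab.1)

-- first-occurrence table change-window -> price for one price sequence and one window length
def altTable (len_ : Int) (prices : List Int) : PySem.Dict (List Int) Int :=
  let changes := altChanges prices
  (PySem.List.pyRange 0 ((changes.length : Int) - len_ + 1) 1).foldl
    (fun table i =>
      table.setdefault (PySem.List.slice changes (some i) (some (i + len_)))
        (PySem.List.pyGetD prices (i + len_) 0))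
    PySem.Dict.empty

def altTables (len_ : Int) (price_sequences : List (List Int)) :
    List (PySem.Dict (List Int) Int) :=
  price_sequences.foldl (fun acc prices => acc ++ [altTable len_ prices]) []

def evaluate_sequence_batch_alt (args : List (List Int) × List (List Int)) :
    List (List Int × Int) :=
  (args.1.foldl
    (fun st seq =>
      let len_ : Int := (seq.length : Int)
      let cache := if st.1.contains len_ then st.1 else st.1.insert len_ (altTables len_ args.2)
      (cache,
        st.2 ++ [(seq, ((cache.getD len_ []).map (fun t => t.getD seq 0)).sum)]))
    (PySem.Dict.empty, [])).2

-- ===== PRECONDITION & SPEC =====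
-- Pre_ excludes exactly the inputs on which Python A raises IndexError (prices[match_index] on an
-- empty price list, reached only by an empty candidate sequence); B raises there too.
def Pre_evaluate_sequence_batch (args : List (List Int) × List (List Int)) : Prop :=
  ¬([] ∈ args.1 ∧ [] ∈ args.2)
instance (args : List (List Int) × List (List Int)) : Decidable (Pre_evaluate_sequence_batch args) := by
  unfold Pre_evaluate_sequence_batch; infer_instance
def pvWitness_evaluate_sequence_batch : (List (List Int) × List (List Int)) :=
  ([[1, -2]], [[3, 4, 2, 5]])
def Spec_evaluate_sequence_batch (args : List (List Int) × List (List Int)) (out : List (List Int × Int)) : Prop := out = evaluate_sequence_batch_alt args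
instance (args : List (List Int) × List (List Int)) (out : List (List Int × Int)) : Decidable (Spec_evaluate_sequence_batch args out) := by unfold Spec_evaluate_sequence_batch; infer_instance

-- ===== CLAIM (what is proved, stated in full; the proofs are below) =====
def Claim_equal_evaluate_sequence_batch : Prop := ∀ (args : List (List Int) × List (List Int)), Dom_evaluate_sequence_batch args → Pre_evaluate_sequence_batch args → Spec_evaluate_sequence_batch args (evaluate_sequence_batch args)

-- ===== LEMMAS AND PROOFS =====

theorem zip_tail_dropLast (p : List Int) : List.zip p p.tail = List.zip p.dropLast p.tail := by
  induction p with
  | nil => rfl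
  | cons a t ih =>
    cases t with
    | nil => rfl
    | cons b t' =>
      simp only [List.tail_cons, List.dropLast, List.zip_cons_cons] at *
      rw [ih]

theorem altChanges_eq (p : List Int) : altChanges p = get_price_changes p := by
  unfold altChanges get_price_changes
  rw [PySem.List.slice_from_one, PySem.List.slice_to_neg_one, zip_tail_dropLast]

theorem inner_iff (c s : List Int) (i : Int) (js : List Int) :
    find_first_match_inner c s i js = true ↔
      ∀ j ∈ js, PySem.List.pyGetD c (i + j) 0 = PySem.List.pyGetD s j 0 := by
  induction js with
  | nil => simp [find_first_match_inner]
  | cons j js ih =>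
    simp only [find_first_match_inner, List.mem_cons]
    split_ifs with h
    · constructor
      · intro hf; exact absurd hf (by simp)
      · intro hall; exact absurd (hall j (Or.inl rfl)) h
    · rw [ih]
      constructor
      · intro hall j' hj'
        rcases hj' with rfl | hj'
        · exact not_not.mp h
        · exact hall j' hj'
      · intro hall j' hj'; exact hall j' (Or.inr hj')

theorem inner_slice (c s : List Int) (i : Int) (h0 : 0 ≤ i)
    (hle : i + (s.length : Int) ≤ (c.length : Int)) :
    find_first_match_inner c s i (PySem.List.pyRange 0 (s.length : Int) 1) = true ↔
      PySem.List.slice c (some i) (some (i + (s.length : Int))) = s := by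
  rw [inner_iff]
  rw [PySem.List.slice_toNat _ h0 (by positivity)]
  have hi : i.toNat + s.length ≤ c.length := by omega
  have hL : (i + (s.length : Int)).toNat - i.toNat = s.length := by omega
  rw [hL]
  constructor
  · intro hall
    apply List.ext_getElem
    · simp; omega
    · intro k hk1 hk2
      have hks : k < s.length := hk2
      have := hall (k : Int) (by rw [PySem.List.mem_pyRange_one]; omega)
      rw [PySem.List.pyGetD_eq_getElem c 0 (by omega) (by omega),
          PySem.List.pyGetD_eq_getElem s 0 (by omega) (by omega)] at this
      simp only [List.getElem_take, List.getElem_drop]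
      have h1 : (i + (k:Int)).toNat = i.toNat + k := by omega
      have h2 : ((k:Int)).toNat = k := by omega
      simp only [h1, h2] at this
      exact this
  · intro heq j hj
    rw [PySem.List.mem_pyRange_one] at hj
    have hk : j.toNat < s.length := by omega
    rw [PySem.List.pyGetD_eq_getElem c 0 (by omega) (by omega),
        PySem.List.pyGetD_eq_getElem s 0 hj.1 (by omega)]
    have := congrArg (fun l => l[j.toNat]?) heq
    simp only [List.getElem?_take, List.getElem?_drop] at this
    have h1 : (i + j).toNat = i.toNat + j.toNat := by omega
    simp only [h1]
    simp only [List.getElem?_eq_getElem (by omega : i.toNat + j.toNat < c.length),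
      List.getElem?_eq_getElem (by omega : j.toNat < s.length)] at this ⊢
    simp only [hk, if_pos] at this
    exact Option.some.inj this

theorem fold_setdefault_preserve (c p : List Int) (L : Int) (s : List Int) (v : Int)
    (is_ : List Int) (t : PySem.Dict (List Int) Int) (h : t.get? s = some v) :
    (is_.foldl
      (fun table i =>
        table.setdefault (PySem.List.slice c (some i) (some (i + L)))
          (PySem.List.pyGetD p (i + L) 0)) t).get? s = some v := by
  induction is_ generalizing t with
  | nil => exact h
  | cons i is_ ih =>
    simp only [List.foldl_cons]
    apply ih
    by_cases hw : s = PySem.List.slice c (some i) (some (i + L))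
    · rw [← hw, PySem.Dict.get?_setdefault_self, h]; rfl
    · rw [PySem.Dict.get?_setdefault_of_ne _ _ hw, h]

theorem fold_setdefault_get (c p s : List Int) (is_ : List Int)
    (t : PySem.Dict (List Int) Int)
    (hb : ∀ i ∈ is_, 0 ≤ i ∧ i + (s.length : Int) ≤ (c.length : Int))
    (ht : t.get? s = none) :
    (is_.foldl
      (fun table i =>
        table.setdefault (PySem.List.slice c (some i) (some (i + (s.length : Int))))
          (PySem.List.pyGetD p (i + (s.length : Int)) 0)) t).getD s 0 =
      (if find_first_match_loop c s (s.length : Int) is_ ≠ -1 then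
        PySem.List.pyGetD p (find_first_match_loop c s (s.length : Int) is_) 0 else 0) := by
  induction is_ generalizing t with
  | nil =>
    simp only [List.foldl_nil, find_first_match_loop]
    rw [PySem.Dict.getD_of_get?_eq_none _ _ ht]
    simp
  | cons i is_ ih =>
    obtain ⟨h0, hle⟩ := hb i (List.mem_cons_self ..)
    simp only [List.foldl_cons, find_first_match_loop]
    by_cases hin : find_first_match_inner c s i (PySem.List.pyRange 0 (s.length : Int) 1) = true
    · have hw : PySem.List.slice c (some i) (some (i + (s.length : Int))) = s :=
        (inner_slice c s i h0 hle).mp hin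
      rw [hin, if_pos rfl, if_pos (by omega : i + (s.length:Int) ≠ -1)]
      have hsv : (PySem.Dict.setdefault t s (PySem.List.pyGetD p (i + (s.length:Int)) 0)).get? s
          = some (PySem.List.pyGetD p (i + (s.length:Int)) 0) := by
        rw [PySem.Dict.get?_setdefault_self, ht]; rfl
      rw [hw]
      exact PySem.Dict.getD_of_get?_eq_some _ _
        (fold_setdefault_preserve c p (s.length:Int) s _ is_ _ hsv)
    · have hw : PySem.List.slice c (some i) (some (i + (s.length : Int))) ≠ s := by
        intro h; exact hin ((inner_slice c s i h0 hle).mpr h)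
      rw [if_neg hin]
      exact ih _ (fun j hj => hb j (List.mem_cons_of_mem _ hj))
        (by rw [PySem.Dict.get?_setdefault_of_ne _ _ (Ne.symm hw), ht])

theorem table_lookup (p s : List Int) :
    (altTable (s.length : Int) p).getD s 0 =
      (if find_first_match (get_price_changes p) s ≠ -1 then
        PySem.List.pyGetD p (find_first_match (get_price_changes p) s) 0 else 0) := by
  unfold altTable find_first_match
  rw [altChanges_eq]
  exact fold_setdefault_get (get_price_changes p) p s _ _
    (fun i hi => by
      rw [PySem.List.mem_pyRange_one] at hi
      omega)
    (PySem.Dict.get?_empty s)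

theorem total_eq (pss : List (List Int)) (s : List Int) :
    (pss.foldl
      (fun tot prices =>
        let changes := get_price_changes prices
        let match_index := find_first_match changes s
        if match_index ≠ -1 then tot + PySem.List.pyGetD prices match_index 0 else tot) 0) =
      ((altTables (s.length : Int) pss).map (fun t => t.getD s 0)).sum := by
  have h1 : (pss.foldl
      (fun tot prices =>
        let changes := get_price_changes prices
        let match_index := find_first_match changes s
        if match_index ≠ -1 then tot + PySem.List.pyGetD prices match_index 0 else tot) 0) =
      pss.foldl (fun tot prices => tot +
        (if find_first_match (get_price_changes prices) s ≠ -1 then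
          PySem.List.pyGetD prices (find_first_match (get_price_changes prices) s) 0 else 0)) 0 := by
    apply PySem.List.foldl_congr_mem
    intro acc x _
    simp only
    split_ifs <;> simp
  rw [h1, PySem.List.foldl_add]
  unfold altTables
  rw [PySem.List.foldl_append_singleton_eq_map]
  simp only [List.nil_append, List.map_map, zero_add]
  congr 1
  apply List.map_congr_left
  intro p _
  simp only [Function.comp_apply]
  rw [table_lookup]

theorem outer_loop (pss : List (List Int)) (batch : List (List Int))
    (cache : PySem.Dict Int (List (PySem.Dict (List Int) Int))) (results : List (List Int × Int))
    (hinv : ∀ L v, cache.get? L = some v → v = altTables L pss) :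
    (batch.foldl
      (fun st seq =>
        let len_ : Int := (seq.length : Int)
        let cache := if st.1.contains len_ then st.1 else st.1.insert len_ (altTables len_ pss)
        (cache,
          st.2 ++ [(seq, ((cache.getD len_ []).map (fun t => t.getD seq 0)).sum)]))
      (cache, results)).2 =
      results ++ batch.map
        (fun s => (s, ((altTables (s.length : Int) pss).map (fun t => t.getD s 0)).sum)) := by
  induction batch generalizing cache results with
  | nil => simp
  | cons s rest ih =>
    rw [List.foldl_cons]
    by_cases hc : cache.contains ((s.length : Int)) = true
    · rw [show (let len_ : Int := (s.length : Int)
          let cache_1 := if (cache, results).1.contains len_ then (cache, results).1 else (cache, results).1.insert len_ (altTables len_ pss)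
          (cache_1, (cache, results).2 ++ [(s, ((cache_1.getD len_ []).map (fun t => t.getD s 0)).sum)])) =
          (cache, results ++ [(s, ((altTables (s.length : Int) pss).map (fun t => t.getD s 0)).sum)]) from by
        have hc' := hc
        rw [PySem.Dict.contains_eq_isSome_get?] at hc'
        obtain ⟨v, hv⟩ := Option.isSome_iff_exists.mp hc'
        simp only [hc, if_pos]
        rw [PySem.Dict.getD_of_get?_eq_some _ _ hv, hinv _ _ hv]]
      rw [ih cache _ hinv]
      simp
    · rw [show (let len_ : Int := (s.length : Int)
          let cache_1 := if (cache, results).1.contains len_ then (cache, results).1 else (cache, results).1.insert len_ (altTables len_ pss)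
          (cache_1, (cache, results).2 ++ [(s, ((cache_1.getD len_ []).map (fun t => t.getD s 0)).sum)])) =
          (cache.insert (s.length : Int) (altTables (s.length : Int) pss),
            results ++ [(s, ((altTables (s.length : Int) pss).map (fun t => t.getD s 0)).sum)]) from by
        simp only [hc, if_neg, Bool.false_eq_true, not_false_iff]
        rw [PySem.Dict.getD_insert_self]]
      rw [ih _ _ (fun L v hLv => by
        rw [PySem.Dict.get?_insert] at hLv
        split_ifs at hLv with hL
        · cases hLv; rw [hL]
        · exact hinv L v hLv)]
      simp

theorem eval_eq (batch pss : List (List Int)) :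
    evaluate_sequence_batch (batch, pss) = evaluate_sequence_batch_alt (batch, pss) := by
  unfold evaluate_sequence_batch evaluate_sequence_batch_alt
  simp only
  rw [outer_loop pss batch PySem.Dict.empty []
    (fun L v h => by rw [PySem.Dict.get?_empty] at h; cases h)]
  rw [PySem.List.foldl_append_singleton_eq_map
    (f := fun seq => (seq, pss.foldl
      (fun tot prices =>
        let changes := get_price_changes prices
        let match_index := find_first_match changes seq
        if match_index ≠ -1 then tot + PySem.List.pyGetD prices match_index 0 else tot) 0))]
  simp only [List.nil_append]
  apply List.map_congr_left
  intro s _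
  rw [total_eq]

-- ===== VERDICT (by name: the statement is the Claim_ definition above) =====
theorem evaluate_sequence_batch_spec : Claim_equal_evaluate_sequence_batch := by
  intro args _ _
  unfold Spec_evaluate_sequence_batch
  obtain ⟨batch, pss⟩ := args
  exact eval_eq batch pss
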